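-- pv_equiv track=rewrite | github.com/molya-polat/LeetCode_practice | problems/3718-smallest-missing-multiple-of-k/3718-smallest-missing-multiple-of-k.py | missingMultiple
-- ===== SOURCE A (Python) =====
-- from typing import List
--
-- def missingMultiple(nums: List[int], k: int) -> int:
--     counter = 1
--     m = k * counter
--     presentMultiples = set()
--     for n in nums:
--         if n % k == 0:
--             presentMultiples.add(n)
--         if n == m:
--             while m in presentMultiples:
--                 counter += 1
--                 m = counter * k
--
--     return m
-- ===== SOURCE B (Python) =====
-- def missingMultiple(nums, k):
--     present = {n for n in nums if n % k == 0}
--     m = k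
--     while m in present:
--         m += k
--     return m
-- ===== Notes on version B (the rewrite author's own statement) =====
-- stated objective: simpler
-- what changed: Replaces A's fused single pass (candidate advancement buried under an n == m guard inside the scan) with two separate phases: one comprehension collecting the multiples of k present in nums, then a plain while-loop probing k, 2k, 3k, ... for the first absent multiple.
import Mathlib
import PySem

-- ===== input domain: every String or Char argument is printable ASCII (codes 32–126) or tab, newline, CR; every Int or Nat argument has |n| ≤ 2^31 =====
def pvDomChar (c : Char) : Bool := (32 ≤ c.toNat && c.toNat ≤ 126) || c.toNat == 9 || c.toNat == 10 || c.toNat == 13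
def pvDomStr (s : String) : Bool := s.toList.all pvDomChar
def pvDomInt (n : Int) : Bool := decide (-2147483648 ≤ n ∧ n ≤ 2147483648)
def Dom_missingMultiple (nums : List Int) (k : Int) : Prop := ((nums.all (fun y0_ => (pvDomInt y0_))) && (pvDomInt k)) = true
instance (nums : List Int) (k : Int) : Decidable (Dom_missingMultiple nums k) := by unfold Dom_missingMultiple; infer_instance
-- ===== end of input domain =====

-- B replaces A's fused single pass (candidate advancement buried under an `n == m` guard inside the
-- scan of nums) by two separate phases: collect the multiples of k present in nums, then probe
-- k, 2k, 3k, … for the first absent one.  Objective: simpler.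

-- ===== PORT A =====
-- Python's inner `while m in presentMultiples: counter += 1; m = counter * k`.
-- Termination device: the recursion erases the tested value from its own copy of the set; this is
-- invisible to the computation on Pre_ inputs because with k ≠ 0 the loop never tests the same
-- value twice (proved in advanceA_spec below) — it only makes the recursion structurally decreasing.
def advanceA (k counter m : Int) (present : List Int) : Int × Int × List Int :=
  if h : m ∈ present then
    advanceA k (counter + 1) ((counter + 1) * k) (present.erase m)
  else (counter, m, present)
termination_by present.length
decreasing_by
  rw [List.length_erase_of_mem h]
  exact Nat.sub_lt (List.length_pos_of_mem h) Nat.one_pos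

-- one iteration of A's `for n in nums` body, state = (counter, m, presentMultiples)
def stepA (k : Int) (st : Int × Int × List Int) (n : Int) : Int × Int × List Int :=
  let p1 := if PySem.Int.mod n k = 0 then PySem.Set.add st.2.2 n else st.2.2
  if n = st.2.1 then advanceA k st.1 st.2.1 p1 else (st.1, st.2.1, p1)

def missingMultiple (nums : List Int) (k : Int) : Int :=
  (nums.foldl (stepA k) (1, k * 1, (PySem.Set.empty : PySem.Set Int))).2.1

-- ===== PORT B =====
-- Python's `while m in present: m += k` (same erase-for-termination device as above, exact on Pre_).
def scanB (k m : Int) (present : List Int) : Int :=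
  if h : m ∈ present then scanB k (m + k) (present.erase m) else m
termination_by present.length
decreasing_by
  rw [List.length_erase_of_mem h]
  exact Nat.sub_lt (List.length_pos_of_mem h) Nat.one_pos

-- Python's `{n for n in nums if n % k == 0}`
def multSet (nums : List Int) (k : Int) : PySem.Set Int :=
  nums.foldl (fun s n => if PySem.Int.mod n k = 0 then PySem.Set.add s n else s) PySem.Set.empty

def missingMultiple_alt (nums : List Int) (k : Int) : Int :=
  scanB k k (multSet nums k)

-- ===== PRECONDITION & SPEC =====
-- Pre_ excludes exactly the inputs where the Python A raises ZeroDivisionError (n % 0 with nums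
-- nonempty); B raises there too.
def Pre_missingMultiple (nums : List Int) (k : Int) : Prop := k ≠ 0 ∨ nums = []
instance (nums : List Int) (k : Int) : Decidable (Pre_missingMultiple nums k) := by
  unfold Pre_missingMultiple; infer_instance

def pvWitness_missingMultiple : List Int × Int := ([2, 4, 7], 2)

def Spec_missingMultiple (nums : List Int) (k : Int) (out : Int) : Prop := out = missingMultiple_alt nums k
instance (nums : List Int) (k : Int) (out : Int) : Decidable (Spec_missingMultiple nums k out) := by unfold Spec_missingMultiple; infer_instance

-- ===== CLAIM (what is proved, stated in full; the proofs are below) =====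
def Claim_equal_missingMultiple : Prop := ∀ (nums : List Int) (k : Int), Dom_missingMultiple nums k → Pre_missingMultiple nums k → Spec_missingMultiple nums k (missingMultiple nums k)

-- ===== LEMMAS AND PROOFS =====

-- membership in the comprehension set
lemma mem_foldl_addIf (k : Int) (xs : List Int) (s : List Int) (x : Int) :
    x ∈ xs.foldl (fun s n => if PySem.Int.mod n k = 0 then PySem.Set.add s n else s) s ↔
      x ∈ s ∨ (x ∈ xs ∧ PySem.Int.mod x k = 0) := by
  induction xs generalizing s with
  | nil => simp
  | cons y ys ih =>
    simp only [List.foldl_cons, ih, List.mem_cons]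
    by_cases hy : PySem.Int.mod y k = 0
    · have hxy : x = y → PySem.Int.mod x k = 0 := fun h => h ▸ hy
      simp only [if_pos hy, PySem.Set.mem_add]
      tauto
    · have hxy : x = y → ¬ PySem.Int.mod x k = 0 := fun h => h ▸ hy
      simp only [if_neg hy]
      tauto

lemma mem_multSet (nums : List Int) (k x : Int) :
    x ∈ multSet nums k ↔ x ∈ nums ∧ PySem.Int.mod x k = 0 := by
  simp [multSet, mem_foldl_addIf, PySem.Set.empty]

lemma mod_mul_self (k j : Int) : PySem.Int.mod (k * j) k = 0 :=
  (PySem.Int.mod_eq_zero_iff_dvd _ _).2 ⟨j, by ring⟩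

-- B's scan returns the first element of the progression m, m+k, m+2k, … outside S
lemma scanB_spec (k : Int) (hk : k ≠ 0) (S : List Int) (m : Int) :
    ∃ j : Nat, scanB k m S = m + k * j ∧ (m + k * j) ∉ S ∧ ∀ i : Nat, i < j → (m + k * i) ∈ S := by
  by_cases h : m ∈ S
  · obtain ⟨j, hj1, hj2, hj3⟩ := scanB_spec k hk (S.erase m) (m + k)
    have harith : ∀ i : Nat, m + k * ((i : Int) + 1) = m + k + k * i := by intro i; ring
    refine ⟨j + 1, ?_, ?_, ?_⟩
    · rw [scanB, dif_pos h, hj1]; push_cast; ring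
    · intro hmem
      push_cast at hmem
      rw [harith j] at hmem
      have hne : m + k + k * (j : Int) ≠ m := by
        intro he
        have h0 : k * ((j : Int) + 1) = 0 := by linarith
        rcases mul_eq_zero.1 h0 with h0 | h0
        · exact hk h0
        · omega
      exact hj2 ((List.mem_erase_of_ne hne).2 hmem)
    · intro i hi
      cases i with
      | zero => simpa using h
      | succ i' =>
        push_cast
        rw [harith i']
        exact List.mem_of_mem_erase (hj3 i' (by omega))
  · refine ⟨0, ?_, by simpa using h, by omega⟩
    rw [scanB, dif_neg h]; simp
termination_by S.length
decreasing_by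
  rw [List.length_erase_of_mem h]
  exact Nat.sub_lt (List.length_pos_of_mem h) Nat.one_pos

-- first-absent value is unique, so scanB equals any value with that description
lemma scanB_eq_of (k : Int) (hk : k ≠ 0) (S : List Int) (m r : Int)
    (hr : ∃ j : Nat, r = m + k * j ∧ r ∉ S ∧ ∀ i : Nat, i < j → (m + k * i) ∈ S) :
    scanB k m S = r := by
  obtain ⟨j1, h1, h2, h3⟩ := scanB_spec k hk S m
  obtain ⟨j2, g1, g2, g3⟩ := hr
  have : j1 = j2 := by
    rcases Nat.lt_trichotomy j1 j2 with h | h | h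
    · exact absurd (g3 j1 h) h2
    · exact h
    · exact absurd (h3 j2 h) (g1 ▸ g2)
  rw [h1, g1, this]

-- the invariant A's fold maintains over the processed prefix xs
def InvA (k : Int) (xs : List Int) (st : Int × Int × List Int) : Prop :=
  1 ≤ st.1 ∧ st.2.1 = k * st.1 ∧
  (∀ x, x ∈ st.2.2 → x ∈ xs ∧ PySem.Int.mod x k = 0) ∧
  (∀ j : Int, st.1 ≤ j → k * j ∈ xs → k * j ∈ st.2.2) ∧
  (∀ j : Int, 1 ≤ j → j < st.1 → k * j ∈ xs) ∧
  st.2.1 ∉ st.2.2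

lemma advanceA_spec (k : Int) (hk : k ≠ 0) (ys : List Int) (c : Int) (P : List Int)
    (hc : 1 ≤ c)
    (hsound : ∀ x, x ∈ P → x ∈ ys ∧ PySem.Int.mod x k = 0)
    (hcomp : ∀ j : Int, c ≤ j → k * j ∈ ys → k * j ∈ P)
    (hbelow : ∀ j : Int, 1 ≤ j → j < c → k * j ∈ ys) :
    InvA k ys (advanceA k c (k * c) P) := by
  by_cases h : k * c ∈ P
  · have hys : k * c ∈ ys := (hsound _ h).1
    have := advanceA_spec k hk ys (c + 1) (P.erase (k * c)) (by omega)
      (fun x hx => hsound x (List.mem_of_mem_erase hx))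
      (fun j hj hjy => by
        refine (List.mem_erase_of_ne ?_).2 (hcomp j (by omega) hjy)
        intro he
        exact absurd (mul_left_cancel₀ hk he) (by omega))
      (fun j h1 h2 => by
        rcases lt_or_eq_of_le (by omega : j ≤ c) with h3 | h3
        · exact hbelow j h1 h3
        · exact h3 ▸ hys)
    have hmul : (c + 1) * k = k * (c + 1) := by ring
    rw [advanceA, dif_pos h, hmul]
    exact this
  · rw [advanceA, dif_neg h]
    exact ⟨hc, rfl, hsound, hcomp, hbelow, h⟩
termination_by P.length
decreasing_by
  rw [List.length_erase_of_mem h]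
  exact Nat.sub_lt (List.length_pos_of_mem h) Nat.one_pos

lemma stepA_inv (k : Int) (hk : k ≠ 0) (xs : List Int) (st : Int × Int × List Int) (n : Int)
    (h : InvA k xs st) : InvA k (xs ++ [n]) (stepA k st n) := by
  obtain ⟨c, m, S⟩ := st
  obtain ⟨hc, hm, hsound, hcomp, hbelow, hnot⟩ := h
  simp only at hc hm hsound hcomp hbelow hnot
  subst hm
  -- facts about the updated set p1
  set p1 := if PySem.Int.mod n k = 0 then PySem.Set.add S n else S with hp1
  have hp1mem : ∀ x, x ∈ p1 ↔ x ∈ S ∨ (x = n ∧ PySem.Int.mod n k = 0) := by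
    intro x
    by_cases hn : PySem.Int.mod n k = 0 <;> simp [hp1, hn, PySem.Set.mem_add]
  have hsound1 : ∀ x, x ∈ p1 → x ∈ xs ++ [n] ∧ PySem.Int.mod x k = 0 := by
    intro x hx
    rcases (hp1mem x).1 hx with hx | ⟨rfl, hx⟩
    · exact ⟨List.mem_append_left _ (hsound x hx).1, (hsound x hx).2⟩
    · exact ⟨List.mem_append_right _ (List.mem_singleton_self x), hx⟩
  have hcomp1 : ∀ j : Int, c ≤ j → k * j ∈ xs ++ [n] → k * j ∈ p1 := by
    intro j hj hjy
    rcases List.mem_append.1 hjy with hjy | hjy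
    · exact (hp1mem _).2 (Or.inl (hcomp j hj hjy))
    · have : k * j = n := List.mem_singleton.1 hjy
      exact (hp1mem _).2 (Or.inr ⟨this, this ▸ mod_mul_self k j⟩)
  have hbelow1 : ∀ j : Int, 1 ≤ j → j < c → k * j ∈ xs ++ [n] :=
    fun j h1 h2 => List.mem_append_left _ (hbelow j h1 h2)
  by_cases hn : n = k * c
  · have : stepA k (c, k * c, S) n = advanceA k c (k * c) p1 := by
      simp [stepA, hn, hp1]
    rw [this]
    exact advanceA_spec k hk (xs ++ [n]) c p1 hc hsound1 hcomp1 hbelow1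
  · have : stepA k (c, k * c, S) n = (c, k * c, p1) := by
      simp [stepA, hn, hp1]
    rw [this]
    refine ⟨hc, rfl, hsound1, hcomp1, hbelow1, ?_⟩
    intro hmem
    rcases (hp1mem _).1 hmem with hx | ⟨hx, _⟩
    · exact hnot hx
    · exact hn hx.symm
  
lemma foldl_inv (k : Int) (hk : k ≠ 0) (xs : List Int) :
    ∀ (pre : List Int) (st : Int × Int × List Int), InvA k pre st →
      InvA k (pre ++ xs) (xs.foldl (stepA k) st) := by
  induction xs with
  | nil => intro pre st h; simpa using h
  | cons x xs ih =>
    intro pre st h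
    have := ih (pre ++ [x]) (stepA k st x) (stepA_inv k hk pre st x h)
    simpa using this

-- ===== VERDICT (by name: the statement is the Claim_ definition above) =====
theorem missingMultiple_spec : Claim_equal_missingMultiple := by
  intro nums k _ hpre
  unfold Spec_missingMultiple missingMultiple missingMultiple_alt
  rcases hpre with hk | hnil
  · have hinit : InvA k [] (1, k * 1, (PySem.Set.empty : PySem.Set Int)) := by
      refine ⟨le_refl 1, by ring, ?_, ?_, ?_, ?_⟩ <;> simp [PySem.Set.empty]
    have hfin := foldl_inv k hk nums [] _ hinit
    simp only [List.nil_append] at hfin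
    obtain ⟨hc, hm, hsound, hcomp, hbelow, hnot⟩ := hfin
    set st := nums.foldl (stepA k) (1, k * 1, (PySem.Set.empty : PySem.Set Int)) with hst
    refine (scanB_eq_of k hk _ _ _ ?_).symm
    refine ⟨(st.1 - 1).toNat, ?_, ?_, ?_⟩
    · rw [hm]
      have : ((st.1 - 1).toNat : Int) = st.1 - 1 := Int.toNat_of_nonneg (by omega)
      rw [this]; ring
    · rw [hm]
      intro hmem
      rw [mem_multSet] at hmem
      exact hnot (hm ▸ hcomp st.1 le_rfl hmem.1)
    · intro i hi
      have hi' : (1 + (i : Int)) < st.1 := by omega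
      have := hbelow (1 + i) (by omega) hi'
      rw [mem_multSet]
      constructor
      · convert this using 1; ring
      · have : k + k * i = k * (1 + i) := by ring
        rw [this]; exact mod_mul_self k _
  · subst hnil
    simp [multSet, scanB, PySem.Set.empty]
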